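-- pv_equiv track=rewrite | github.com/shuttle0615/stock_price_prediction | Evaluation/accuracy.py | stat_computation
-- ===== SOURCE A (Python) =====
-- def stat_computation(a, b):
--     positive_actual = 0
--     neutral_actual = 0
--     negative_actual = 0
--
--     positive_prediction = 0
--
--     prediction_hit = 0
--     prediction_nuetral = 0
--     prediction_miss = 0
--
--     for i, (out, lab) in enumerate(zip(a,b)):
--         #actual positive reaction
--         if lab == [1,0,0]:
--             positive_actual += 1
--         elif lab == [0,1,0]:
--             neutral_actual += 1
--         elif lab == [0,0,1]:
--             negative_actual += 1
--
--         #positive predicted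
--         if out == [1,0,0]:
--             positive_prediction += 1
--             if lab == [1,0,0]:
--                 prediction_hit += 1
--             elif lab == [0,1,0]:
--                 prediction_nuetral += 1
--             elif lab == [0,0,1]:
--                 prediction_miss += 1
--
--     return positive_actual, neutral_actual, negative_actual, positive_prediction, prediction_hit, prediction_nuetral, prediction_miss
-- ===== SOURCE B (Python) =====
-- def stat_computation(a, b):
--     def classify(v):
--         if v == [1, 0, 0]:
--             return 0
--         if v == [0, 1, 0]:
--             return 1
--         if v == [0, 0, 1]:
--             return 2
--         return 3  # unclassified
--     counts = [[0] * 4 for _ in range(4)]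
--     for out, lab in zip(a, b):
--         counts[classify(out)][classify(lab)] += 1
--     col = lambda l: sum(counts[p][l] for p in range(4))
--     row = lambda p: sum(counts[p][l] for l in range(4))
--     return (col(0), col(1), col(2), row(0), counts[0][0], counts[0][1], counts[0][2])
-- ===== Notes on version B (the rewrite author's own statement) =====
-- stated objective: alternative
-- what changed: B classifies each pair once into a 4x4 contingency table (pred class x label class, with an 'other' bucket) in a single pass and reads the seven outputs as table cells and marginal sums, instead of A's seven independent counters updated through nested if/elif chains.
import Mathlib
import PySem

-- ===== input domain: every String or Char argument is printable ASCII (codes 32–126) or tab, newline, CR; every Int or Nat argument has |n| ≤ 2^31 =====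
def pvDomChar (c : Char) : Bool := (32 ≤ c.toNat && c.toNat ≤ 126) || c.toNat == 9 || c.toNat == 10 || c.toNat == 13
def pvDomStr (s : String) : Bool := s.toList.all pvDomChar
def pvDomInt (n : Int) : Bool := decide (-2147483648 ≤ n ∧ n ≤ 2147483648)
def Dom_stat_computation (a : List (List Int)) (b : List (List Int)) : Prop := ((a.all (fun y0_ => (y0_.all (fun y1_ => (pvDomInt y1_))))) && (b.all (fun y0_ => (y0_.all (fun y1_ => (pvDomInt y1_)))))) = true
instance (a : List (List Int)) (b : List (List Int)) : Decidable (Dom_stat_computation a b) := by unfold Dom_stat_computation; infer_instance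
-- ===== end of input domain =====

-- B replaces A's seven independent counters with one 4x4 contingency table (pred class x label class,
-- with an 'other' bucket) filled in a single pass, reading the results as cells and marginal sums. Alternative decomposition, same cost.

-- ===== PORT A =====
-- one iteration of A's loop body (the Int index is Python's unused `i` from enumerate)
def pvAStep (s : Int × Int × Int × Int × Int × Int × Int) (p : Int × (List Int × List Int)) :
    Int × Int × Int × Int × Int × Int × Int :=
  let (pa, na, ga, pp, ph, pn, pm) := s
  let (outv, lab) := p.2
  -- actual reaction branch (if/elif/elif)
  let (pa, na, ga) :=
    if lab = [1, 0, 0] then (pa + 1, na, ga)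
    else if lab = [0, 1, 0] then (pa, na + 1, ga)
    else if lab = [0, 0, 1] then (pa, na, ga + 1)
    else (pa, na, ga)
  -- positive-predicted branch with its nested if/elif/elif
  let (pp, ph, pn, pm) :=
    if outv = [1, 0, 0] then
      if lab = [1, 0, 0] then (pp + 1, ph + 1, pn, pm)
      else if lab = [0, 1, 0] then (pp + 1, ph, pn + 1, pm)
      else if lab = [0, 0, 1] then (pp + 1, ph, pn, pm + 1)
      else (pp + 1, ph, pn, pm)
    else (pp, ph, pn, pm)
  (pa, na, ga, pp, ph, pn, pm)

def stat_computation (a : List (List Int)) (b : List (List Int)) : Int × Int × Int × Int × Int × Int × Int :=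
  (PySem.List.enumerate (a.zip b) 0).foldl pvAStep (0, 0, 0, 0, 0, 0, 0)

-- ===== PORT B =====
-- classify a value by == comparison against the three one-hot labels; 3 = unclassified
def pvClassify (v : List Int) : Nat :=
  if v = [1, 0, 0] then 0
  else if v = [0, 1, 0] then 1
  else if v = [0, 0, 1] then 2
  else 3

-- counts[p][l] += 1  on the mutable 4x4 table, as a pointwise functional update
def pvBump (c : Nat → Nat → Int) (pc lc : Nat) : Nat → Nat → Int :=
  fun p l => if p = pc ∧ l = lc then c p l + 1 else c p l

def pvTable : List (List Int × List Int) → (Nat → Nat → Int) → (Nat → Nat → Int)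
  | [], c => c
  | (outv, lab) :: rest, c => pvTable rest (pvBump c (pvClassify outv) (pvClassify lab))

-- column marginal (sum over pred classes) and row marginal (sum over label classes)
def pvCol (c : Nat → Nat → Int) (l : Nat) : Int := c 0 l + c 1 l + c 2 l + c 3 l
def pvRow (c : Nat → Nat → Int) (p : Nat) : Int := c p 0 + c p 1 + c p 2 + c p 3

def stat_computation_alt (a : List (List Int)) (b : List (List Int)) : Int × Int × Int × Int × Int × Int × Int :=
  let t := pvTable (a.zip b) (fun _ _ => 0)
  (pvCol t 0, pvCol t 1, pvCol t 2, pvRow t 0, t 0 0, t 0 1, t 0 2)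

-- ===== PRECONDITION & SPEC =====
def Spec_stat_computation (a : List (List Int)) (b : List (List Int)) (out : Int × Int × Int × Int × Int × Int × Int) : Prop := out = stat_computation_alt a b
instance (a : List (List Int)) (b : List (List Int)) (out : Int × Int × Int × Int × Int × Int × Int) : Decidable (Spec_stat_computation a b out) := by unfold Spec_stat_computation; infer_instance

-- ===== CLAIM (what is proved, stated in full; the proofs are below) =====
def Claim_equal_stat_computation : Prop := ∀ (a : List (List Int)) (b : List (List Int)), Dom_stat_computation a b → Spec_stat_computation a b (stat_computation a b)

-- ===== LEMMAS AND PROOFS =====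

-- A's foldl over enumerate ignores the index, so it is a fold over the raw pair list
theorem pvA_enumerate (zs : List (List Int × List Int)) :
    ∀ (i : Int) (s : Int × Int × Int × Int × Int × Int × Int),
      (PySem.List.enumerate zs i).foldl pvAStep s = zs.foldl (fun s p => pvAStep s (0, p)) s := by
  induction zs with
  | nil => intro i s; simp [PySem.List.enumerate_nil]
  | cons hd tl ih =>
    intro i s
    simp only [PySem.List.enumerate_cons, List.foldl_cons, ih]
    rfl

theorem pvBump_cell (c : Nat → Nat → Int) (pc lc p l : Nat) :
    pvBump c pc lc p l = c p l + (if p = pc ∧ l = lc then 1 else 0) := by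
  simp [pvBump]; split <;> simp

-- main invariant: running A's loop from the marginals of a table c equals the marginals after filling c
theorem pvLoop_eq (zs : List (List Int × List Int)) :
    ∀ (c : Nat → Nat → Int),
      zs.foldl (fun s p => pvAStep s (0, p)) (pvCol c 0, pvCol c 1, pvCol c 2, pvRow c 0, c 0 0, c 0 1, c 0 2)
      = (pvCol (pvTable zs c) 0, pvCol (pvTable zs c) 1, pvCol (pvTable zs c) 2,
          pvRow (pvTable zs c) 0, pvTable zs c 0 0, pvTable zs c 0 1, pvTable zs c 0 2) := by
  induction zs with
  | nil => intro c; rfl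
  | cons hd tl ih =>
    intro c
    obtain ⟨outv, lab⟩ := hd
    rw [List.foldl_cons, pvTable]
    have hstep :
        pvAStep (pvCol c 0, pvCol c 1, pvCol c 2, pvRow c 0, c 0 0, c 0 1, c 0 2) (0, outv, lab)
        = (pvCol (pvBump c (pvClassify outv) (pvClassify lab)) 0,
           pvCol (pvBump c (pvClassify outv) (pvClassify lab)) 1,
           pvCol (pvBump c (pvClassify outv) (pvClassify lab)) 2,
           pvRow (pvBump c (pvClassify outv) (pvClassify lab)) 0,
           pvBump c (pvClassify outv) (pvClassify lab) 0 0,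
           pvBump c (pvClassify outv) (pvClassify lab) 0 1,
           pvBump c (pvClassify outv) (pvClassify lab) 0 2) := by
      by_cases ho1 : outv = [1, 0, 0] <;>
        by_cases ho2 : outv = [0, 1, 0] <;>
          by_cases ho3 : outv = [0, 0, 1] <;>
            by_cases hl1 : lab = [1, 0, 0] <;>
              by_cases hl2 : lab = [0, 1, 0] <;>
                by_cases hl3 : lab = [0, 0, 1] <;>
                  simp [pvAStep, pvClassify, pvCol, pvRow, pvBump_cell, ho1, ho2, ho3, hl1, hl2, hl3]
      all_goals first | omega | simp_all
    rw [hstep, ih]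

-- ===== VERDICT (by name: the statement is the Claim_ definition above) =====
theorem stat_computation_spec : Claim_equal_stat_computation := by
  intro a b _
  show stat_computation a b = stat_computation_alt a b
  unfold stat_computation stat_computation_alt
  rw [pvA_enumerate]
  have h0 : ∀ l : Nat, ((0 : Int), (0 : Int), (0 : Int), (0 : Int), (0 : Int), (0 : Int), (0 : Int))
      = (pvCol (fun _ _ => (0 : Int)) 0, pvCol (fun _ _ => (0 : Int)) 1, pvCol (fun _ _ => (0 : Int)) 2,
          pvRow (fun _ _ => (0 : Int)) 0, (0 : Int), (0 : Int), (0 : Int)) := by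
    intro l; simp [pvCol, pvRow]
  rw [h0 0, pvLoop_eq]
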